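-- pv_equiv track=rewrite | github.com/talisto/ghidra-turbo-pascal | analyze_exe.py | build_segment_map
-- ===== SOURCE A (Python) =====
-- from collections import defaultdict
--
-- GHIDRA_BASE_SEG = 0x1000
--
-- def build_segment_map(relocations: list[dict]) -> list[dict]:
--     """Build a map of unique Borland Pascal segments from relocation entries.
--     Returns sorted list of {original_seg, ghidra_seg, image_offset, ref_count}.
--     """
--     seg_counts: dict[int, int] = defaultdict(int)
--     for r in relocations:
--         if r['original_value'] is not None:
--             seg_counts[r['original_value']] += 1
--
--     segments = []
--     for orig_seg, count in sorted(seg_counts.items()):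
--         segments.append({
--             'original_seg': orig_seg,
--             'ghidra_seg': orig_seg + GHIDRA_BASE_SEG,
--             'image_offset': orig_seg * 16,
--             'ref_count': count,
--         })
--     return segments
-- ===== SOURCE B (Python) =====
-- GHIDRA_BASE_SEG = 0x1000
--
-- def build_segment_map(relocations: list[dict]) -> list[dict]:
--     """Build a map of unique Borland Pascal segments from relocation entries.
--     Returns sorted list of {original_seg, ghidra_seg, image_offset, ref_count}.
--     """
--     vals = sorted(r['original_value'] for r in relocations
--                   if r['original_value'] is not None)
--     segments = []
--     i, n = 0, len(vals)
--     while i < n: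
--         s = vals[i]
--         j = i + 1
--         while j < n and vals[j] == s:
--             j += 1
--         segments.append({
--             'original_seg': s,
--             'ghidra_seg': s + GHIDRA_BASE_SEG,
--             'image_offset': s * 16,
--             'ref_count': j - i,
--         })
--         i = j
--     return segments
-- ===== Notes on version B (the rewrite author's own statement) =====
-- stated objective: alternative
-- what changed: B keeps no counting dict at all: it sorts the raw non-None relocation values once and then emits one record per run of equal values in a single adjacency scan (run length = ref_count), instead of A's defaultdict accumulation followed by sorting the items.
import Mathlib
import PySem

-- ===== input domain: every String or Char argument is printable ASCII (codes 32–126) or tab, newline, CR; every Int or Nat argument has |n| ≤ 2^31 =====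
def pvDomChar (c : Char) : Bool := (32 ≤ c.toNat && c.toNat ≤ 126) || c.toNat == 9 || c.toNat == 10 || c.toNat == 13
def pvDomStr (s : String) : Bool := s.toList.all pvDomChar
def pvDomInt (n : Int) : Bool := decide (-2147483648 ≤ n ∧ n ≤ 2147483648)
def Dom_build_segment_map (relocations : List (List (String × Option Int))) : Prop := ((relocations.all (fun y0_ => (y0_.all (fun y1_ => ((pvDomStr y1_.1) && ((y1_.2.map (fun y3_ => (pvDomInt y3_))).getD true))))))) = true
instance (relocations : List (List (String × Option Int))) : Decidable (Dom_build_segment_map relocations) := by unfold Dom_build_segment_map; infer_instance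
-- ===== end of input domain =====

-- B keeps no counting dict: it sorts the non-None values once and emits one record per
-- run of equal adjacent values in a single scan (objective: alternative).


-- step of A's accumulation loop (shared with the lemmas below)
def pvAstep (d : PySem.Dict Int Int) (r : List (String × Option Int)) : PySem.Dict Int Int :=
  match (PySem.Dict.mk r).get? "original_value" with
  | some (some v) => d.insert v (d.getD v 0 + 1)   -- seg_counts[r['original_value']] += 1 (defaultdict)
  | some none => d                                  -- value is None: skipped
  | none => d                                       -- KeyError: excluded by Pre_

-- step of B's value-collecting pass (shared with the lemmas below)
def pvBstep (acc : List Int) (r : List (String × Option Int)) : List Int :=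
  match (PySem.Dict.mk r).get? "original_value" with
  | some (some v) => acc ++ [v]
  | some none => acc
  | none => acc                                     -- KeyError: excluded by Pre_

-- ===== PORT A =====
def build_segment_map (relocations : List (List (String × Option Int))) : List (List (String × Int)) :=
  let seg_counts : PySem.Dict Int Int := relocations.foldl pvAstep PySem.Dict.empty
  (PySem.List.sorted2 seg_counts.items (fun p => p.1) (fun p => p.2)).map (fun p =>
    [("original_seg", p.1), ("ghidra_seg", p.1 + 4096),
     ("image_offset", p.1 * 16), ("ref_count", p.2)])

-- ===== PORT B =====
-- B's outer while-loop: each step peels one run of equal values (s = vals[i]; the inner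
-- while advancing j is the takeWhile/dropWhile split of the tail) and records (s, j - i).
def pvRuns (l : List Int) : List (Int × Int) :=
  match l with
  | [] => []
  | x :: xs =>
    (x, 1 + ((xs.takeWhile (· == x)).length : Int)) :: pvRuns (xs.dropWhile (· == x))
termination_by l.length
decreasing_by simpa using Nat.lt_succ_of_le (List.length_dropWhile_le (· == x) xs)

def build_segment_map_alt (relocations : List (List (String × Option Int))) : List (List (String × Int)) :=
  let vals : List Int := PySem.List.sorted (relocations.foldl pvBstep []) (fun x => x)
  (pvRuns vals).map (fun p =>
    [("original_seg", p.1), ("ghidra_seg", p.1 + 4096),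
     ("image_offset", p.1 * 16), ("ref_count", p.2)])

-- ===== PRECONDITION & SPEC =====
-- Pre_ excludes exactly the rows without an 'original_value' key, on which both Pythons raise KeyError.
def Pre_build_segment_map (relocations : List (List (String × Option Int))) : Prop :=
  ∀ r ∈ relocations, (PySem.Dict.mk r).contains "original_value" = true
instance (relocations : List (List (String × Option Int))) : Decidable (Pre_build_segment_map relocations) := by unfold Pre_build_segment_map; infer_instance
def pvWitness_build_segment_map : (List (List (String × Option Int))) :=
  [[("original_value", some 2)], [("original_value", none)], [("original_value", some 2)], [("original_value", some 1)]]
def Spec_build_segment_map (relocations : List (List (String × Option Int))) (out : List (List (String × Int))) : Prop := out = build_segment_map_alt relocations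
instance (relocations : List (List (String × Option Int))) (out : List (List (String × Int))) : Decidable (Spec_build_segment_map relocations out) := by unfold Spec_build_segment_map; infer_instance

-- ===== CLAIM (what is proved, stated in full; the proofs are below) =====
def Claim_equal_build_segment_map : Prop := ∀ (relocations : List (List (String × Option Int))), Dom_build_segment_map relocations → Pre_build_segment_map relocations → Spec_build_segment_map relocations (build_segment_map relocations)

-- ===== LEMMAS AND PROOFS =====

-- the (0 or 1) relocation values a row contributes
def pvVal (r : List (String × Option Int)) : List Int :=
  match (PySem.Dict.mk r).get? "original_value" with
  | some (some v) => [v]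
  | _ => []

theorem pvB_vals (rel : List (List (String × Option Int))) (acc : List Int) :
    rel.foldl pvBstep acc = acc ++ rel.flatMap pvVal := by
  induction rel generalizing acc with
  | nil => simp
  | cons r rest ih =>
    simp only [List.foldl_cons, List.flatMap_cons, ih, pvVal, pvBstep]
    rcases h : (PySem.Dict.mk r).get? "original_value" with _ | _ | v <;> simp

theorem pvA_counts (rel : List (List (String × Option Int))) (d : PySem.Dict Int Int) :
    rel.foldl pvAstep d = (rel.flatMap pvVal).foldl (fun d v => d.insert v (d.getD v 0 + 1)) d := by
  induction rel generalizing d with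
  | nil => simp
  | cons r rest ih =>
    simp only [List.foldl_cons, List.flatMap_cons, List.foldl_append, ih, pvVal, pvAstep]
    rcases h : (PySem.Dict.mk r).get? "original_value" with _ | _ | v <;> simp

theorem pvInsertBy_congr {α : Type} (p q : α → α → Bool) (x : α) (ys : List α)
    (h : ∀ y ∈ ys, p x y = q x y) : PySem.List.insertBy p x ys = PySem.List.insertBy q x ys := by
  induction ys with
  | nil => rfl
  | cons y ys ih =>
    simp only [PySem.List.insertBy]
    rw [h y (by simp)]
    split_ifs with hb
    · rfl
    · rw [ih (fun z hz => h z (by simp [hz]))]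

theorem pvFoldl_insertBy_congr {α : Type} (p q : α → α → Bool) (xs : List α) (acc : List α)
    (h : ∀ a ∈ xs, ∀ b, (b ∈ acc ∨ b ∈ xs) → p a b = q a b) :
    xs.foldl (fun acc x => PySem.List.insertBy p x acc) acc
      = xs.foldl (fun acc x => PySem.List.insertBy q x acc) acc := by
  induction xs generalizing acc with
  | nil => rfl
  | cons x xs ih =>
    simp only [List.foldl_cons]
    rw [pvInsertBy_congr p q x acc (fun y hy => h x (by simp) y (Or.inl hy))]
    apply ih
    intro a ha b hb
    apply h a (by simp [ha])
    rcases hb with hb | hb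
    · rcases (PySem.List.mem_insertBy q x b acc).1 hb with rfl | hb
      · right; simp
      · left; exact hb
    · right; simp [hb]

-- sorted on a tuple key coincides with sorted on the first key alone when that key is injective on the list
theorem pvSorted2_eq_sorted {α : Type} (xs : List α) (k1 k2 : α → Int)
    (hinj : ∀ a ∈ xs, ∀ b ∈ xs, k1 a = k1 b → a = b) :
    PySem.List.sorted2 xs k1 k2 = PySem.List.sorted xs k1 := by
  simp only [PySem.List.sorted2, PySem.List.sorted, if_neg (by decide : ¬ (false = true))]
  apply pvFoldl_insertBy_congr
  intro a ha b hb
  rcases hb with hb | hb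
  · simp at hb
  · rcases lt_trichotomy (k1 a) (k1 b) with hlt | heq | hgt
    · simp [hlt]
    · have : a = b := hinj a ha b hb heq
      subst this
      simp
    · simp [hgt, not_lt_of_gt hgt]

theorem pvSorted_items (vals : List Int) :
    PySem.List.sorted2 (PySem.Dict.counter vals).items (fun p => p.1) (fun p => p.2)
      = (PySem.List.sorted (PySem.Set.ofList vals) (fun x => x)).map
          (fun k => (k, (vals.count k : Int))) := by
  rw [PySem.Dict.items_counter]
  rw [pvSorted2_eq_sorted]
  · apply PySem.List.sorted_eq_of_perm_of_pairwise_lt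
    · exact (PySem.List.sorted_perm _ _ _).map _
    · exact (PySem.List.sorted_ofList_pairwise_lt vals).map _ (by intro a b h; exact h)
  · intro a ha b hb h
    simp only [List.mem_map] at ha hb
    obtain ⟨ka, _, rfl⟩ := ha
    obtain ⟨kb, _, rfl⟩ := hb
    simp_all

-- after dropping the leading run of x, every remaining value is strictly greater
theorem pvDrop_gt (x : Int) (xs : List Int) (hs : xs.Pairwise (· ≤ ·))
    (hle : ∀ y ∈ xs, x ≤ y) : ∀ y ∈ xs.dropWhile (· == x), x < y := by
  induction xs with
  | nil => simp
  | cons y ys ih =>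
    by_cases h : y = x
    · subst h
      simp only [List.dropWhile_cons, beq_self_eq_true]
      exact ih hs.of_cons (fun z hz => hle z (by simp [hz]))
    · have hxy : x < y := lt_of_le_of_ne (hle y (by simp)) (Ne.symm h)
      rw [List.dropWhile_cons_of_neg (by simpa using h)]
      intro z hz
      rcases List.mem_cons.1 hz with rfl | hz
      · exact hxy
      · exact lt_of_lt_of_le hxy (List.rel_of_pairwise_cons hs hz)

-- run-length scan of a sorted list = the strictly-increasing key list paired with counts
theorem pvRuns_sorted_eq (l : List Int) (hs : l.Pairwise (· ≤ ·)) :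
    ∀ (d : List Int), d.Pairwise (· < ·) → (∀ a, a ∈ d ↔ a ∈ l) →
    pvRuns l = d.map (fun k => (k, (l.count k : Int))) := by
  induction l using pvRuns.induct with
  | case1 =>
    intro d _ hm
    have : d = [] := by
      cases d with
      | nil => rfl
      | cons a d' => exact absurd ((hm a).1 (by simp)) (by simp)
    subst this
    rw [pvRuns]
    rfl
  | case2 x xs ih =>
    intro d hd hm
    have hxle : ∀ y ∈ xs, x ≤ y := fun y hy => List.rel_of_pairwise_cons hs hy
    have hrun : ∀ y ∈ xs.takeWhile (· == x), y = x := by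
      intro y hy
      exact eq_of_beq (List.mem_takeWhile_imp (p := fun z => z == x) (l := xs) hy)
    have hrest_gt : ∀ y ∈ xs.dropWhile (· == x), x < y := pvDrop_gt x xs hs.of_cons hxle
    have hrest_sorted : (xs.dropWhile (· == x)).Pairwise (· ≤ ·) :=
      hs.of_cons.sublist (List.dropWhile_sublist _)
    -- d starts with x
    obtain ⟨d', rfl⟩ : ∃ d', d = x :: d' := by
      cases d with
      | nil => exact absurd ((hm x).2 (by simp)) (by simp)
      | cons a d' =>
        have hax : a = x := by
          have hal : a ∈ x :: xs := (hm a).1 (by simp)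
          have hxa : x ≤ a := by
            rcases List.mem_cons.1 hal with rfl | hal
            · rfl
            · exact hxle a hal
          rcases List.mem_cons.1 ((hm x).2 (by simp)) with h | h
          · exact h.symm
          · exact absurd hxa (not_le_of_gt (List.rel_of_pairwise_cons hd h))
        exact ⟨d', by rw [hax]⟩
    -- membership of d' is membership of the rest
    have hm' : ∀ a, a ∈ d' ↔ a ∈ xs.dropWhile (· == x) := by
      intro a
      constructor
      · intro ha
        have hax : x < a := List.rel_of_pairwise_cons hd ha
        have : a ∈ x :: xs := (hm a).1 (by simp [ha])
        rcases List.mem_cons.1 this with rfl | hals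
        · exact absurd hax (lt_irrefl a)
        · rw [← List.takeWhile_append_dropWhile (p := (· == x)) (l := xs)] at hals
          rcases List.mem_append.1 hals with h | h
          · exact absurd (hrun a h) (by intro h'; exact absurd (h' ▸ hax) (lt_irrefl x))
          · exact h
      · intro ha
        have hax : x < a := hrest_gt a ha
        have : a ∈ x :: xs := by
          right
          exact (List.dropWhile_sublist _).mem ha
        rcases List.mem_cons.1 ((hm a).2 this) with h | h
        · exact absurd (h ▸ hax) (lt_irrefl x)
        · exact h
    have hcx : ((x :: xs).count x : Int) = 1 + ((xs.takeWhile (· == x)).length : Int) := by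
      have hsplit : xs = xs.takeWhile (· == x) ++ xs.dropWhile (· == x) :=
        (List.takeWhile_append_dropWhile).symm
      rw [List.count_cons_self]
      conv_lhs => rw [hsplit, List.count_append]
      have h1 : (xs.takeWhile (· == x)).count x = (xs.takeWhile (· == x)).length := by
        apply List.count_eq_length.2
        intro y hy
        simp [hrun y hy]
      have h2 : (xs.dropWhile (· == x)).count x = 0 := by
        apply List.count_eq_zero.2
        intro hmem
        exact absurd (hrest_gt x hmem) (lt_irrefl x)
      omega
    have hcrest : ∀ k ∈ d', ((x :: xs).count k : Int) = ((xs.dropWhile (· == x)).count k : Int) := by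
      intro k hk
      have hxk : x < k := List.rel_of_pairwise_cons hd hk
      have hsplit : xs = xs.takeWhile (· == x) ++ xs.dropWhile (· == x) :=
        (List.takeWhile_append_dropWhile).symm
      rw [List.count_cons_of_ne (by intro h; exact absurd (h ▸ hxk) (lt_irrefl x))]
      conv_lhs => rw [hsplit, List.count_append]
      have : (xs.takeWhile (· == x)).count k = 0 := by
        apply List.count_eq_zero.2
        intro hmem
        exact absurd (hrun k hmem ▸ hxk) (lt_irrefl x)
      omega
    rw [pvRuns]
    simp only [List.map_cons, hcx]
    congr 1
    rw [ih hrest_sorted d' hd.of_cons hm']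
    exact (List.map_congr_left (fun k hk => by rw [← hcrest k hk])).symm

-- ===== VERDICT (by name: the statement is the Claim_ definition above) =====
theorem build_segment_map_spec : Claim_equal_build_segment_map := by
  intro rel _ _
  show build_segment_map rel = build_segment_map_alt rel
  simp only [build_segment_map, build_segment_map_alt]
  rw [pvA_counts, pvB_vals, List.nil_append]
  set v := rel.flatMap pvVal with hv
  rw [PySem.Dict.foldl_insert_getD_add_one_eq_counter, pvSorted_items]
  rw [pvRuns_sorted_eq (PySem.List.sorted v (fun x => x))
      (by simpa using PySem.List.sorted_pairwise v (fun x => x))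
      (PySem.List.sorted (PySem.Set.ofList v) (fun x => x))
      (PySem.List.sorted_ofList_pairwise_lt v)
      (by intro a; rw [PySem.List.mem_sorted, PySem.Set.mem_ofList, PySem.List.mem_sorted])]
  rw [List.map_map, List.map_map]
  apply List.map_congr_left
  intro k hk
  have : (PySem.List.sorted v (fun x => x)).count k = v.count k :=
    (PySem.List.sorted_perm v (fun x => x) false).count_eq k
  simp [this]
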